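-- pv_equiv track=rewrite | github.com/Haifeng-Zeng/xml2csv_sams | xml_to_csv.py | remove_ns
-- ===== SOURCE A (Python) =====
-- def remove_ns(source) :
--     target = ""
--     output = True
--     for ch in source :
--         if ch != "}" and not output :
--             continue
--         if ch == "{" :
--             output = False
--         elif ch == "}" :
--             output = True
--         else :
--             target += ch
--     return target
-- ===== SOURCE B (Python) =====
-- def remove_ns(source):
--     out = []
--     i = 0
--     n = len(source)
--     while i < n:
--         c = source[i]
--         if c == "{":
--             j = source.find("}", i)
--             if j == -1:
--                 break
--             i = j + 1
--         elif c == "}":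
--             i += 1
--         else:
--             out.append(c)
--             i += 1
--     return "".join(out)
-- ===== Notes on version B (the rewrite author's own statement) =====
-- stated objective: alternative
-- what changed: Replaced the per-character boolean state machine with an index scan that jumps over whole {...} segments using str.find, collecting kept characters in a list joined once.
import Mathlib
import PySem

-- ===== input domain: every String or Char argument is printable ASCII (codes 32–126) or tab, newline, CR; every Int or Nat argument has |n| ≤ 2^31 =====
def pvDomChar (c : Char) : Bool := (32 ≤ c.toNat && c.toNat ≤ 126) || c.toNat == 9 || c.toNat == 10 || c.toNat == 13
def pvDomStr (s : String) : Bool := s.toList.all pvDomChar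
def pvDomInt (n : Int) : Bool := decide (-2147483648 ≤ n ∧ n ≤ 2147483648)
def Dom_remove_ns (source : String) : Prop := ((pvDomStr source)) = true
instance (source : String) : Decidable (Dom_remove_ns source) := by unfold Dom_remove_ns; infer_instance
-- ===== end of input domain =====

-- B replaces A's per-character boolean state machine by a scan that jumps past whole {...} segments; proved to return the same string on every input.

-- ===== PORT A =====
-- A's loop: fold over the characters with state (target, output).
def removeNsStep (st : List Char × Bool) (ch : Char) : List Char × Bool :=
  if ch ≠ '}' ∧ ¬ st.2 then st
  else if ch = '{' then (st.1, false)
  else if ch = '}' then (st.1, true)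
  else (st.1 ++ [ch], st.2)

def remove_ns (source : String) : String :=
  String.mk (source.toList.foldl removeNsStep ([], true)).1

-- ===== PORT B =====
-- skipSeg l = the suffix after the first '}' in l (Python's source.find("}", i) jump), none if absent.
def skipSeg : List Char → Option (List Char)
  | [] => none
  | c :: rest => if c = '}' then some rest else skipSeg rest

theorem skipSeg_length : ∀ (l r : List Char), skipSeg l = some r → r.length < l.length := by
  intro l
  induction l with
  | nil => intro r h; simp [skipSeg] at h
  | cons c rest ih =>
    intro r h
    simp only [skipSeg] at h
    split at h
    · cases h; simp
    · exact Nat.lt_succ_of_lt (ih r h)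

-- B's scan-and-jump loop over the character list.
def removeNsGo : List Char → List Char
  | [] => []
  | c :: rest =>
    if c = '{' then
      match h : skipSeg rest with
      | none => []
      | some rest' => removeNsGo rest'
    else if c = '}' then removeNsGo rest
    else c :: removeNsGo rest
termination_by l => l.length
decreasing_by
  · exact Nat.lt_succ_of_lt (skipSeg_length rest rest' h)
  · simp
  · simp

def remove_ns_alt (source : String) : String :=
  String.mk (removeNsGo source.toList)

-- ===== PRECONDITION & SPEC =====
def Spec_remove_ns (source : String) (out : String) : Prop := out = remove_ns_alt source
instance (source : String) (out : String) : Decidable (Spec_remove_ns source out) := by unfold Spec_remove_ns; infer_instance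

-- ===== CLAIM (what is proved, stated in full; the proofs are below) =====
def Claim_equal_remove_ns : Prop := ∀ (source : String), Dom_remove_ns source → Spec_remove_ns source (remove_ns source)

-- ===== LEMMAS AND PROOFS =====

-- What B computes when A's state machine is in the output=false state: skip to past the first '}'.
def skipRest (l : List Char) : List Char :=
  match skipSeg l with
  | none => []
  | some r => removeNsGo r

theorem removeNsGo_open (rest : List Char) :
    removeNsGo ('{' :: rest) = skipRest rest := by
  rw [removeNsGo, skipRest]
  simp only [if_pos rfl]
  cases h : skipSeg rest <;> simp

theorem fold_both (l : List Char) : ∀ (acc : List Char),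
    (l.foldl removeNsStep (acc, true)).1 = acc ++ removeNsGo l ∧
    (l.foldl removeNsStep (acc, false)).1 = acc ++ skipRest l := by
  induction l with
  | nil => intro acc; simp [removeNsGo, skipRest, skipSeg]
  | cons c rest ih =>
    intro acc
    constructor
    · by_cases h1 : c = '{'
      · subst h1
        simp only [List.foldl_cons, removeNsStep, removeNsGo_open]
        norm_num
        exact (ih acc).2
      · by_cases h2 : c = '}'
        · subst h2
          simp only [List.foldl_cons, removeNsStep]
          norm_num
          rw [removeNsGo]
          simp [(ih acc).1]
        · simp only [List.foldl_cons, removeNsStep]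
          rw [if_neg (by simp [h2]), if_neg h1, if_neg h2]
          rw [removeNsGo, if_neg h1, if_neg h2]
          rw [(ih (acc ++ [c])).1]
          simp
    · by_cases h2 : c = '}'
      · subst h2
        simp only [List.foldl_cons, removeNsStep]
        norm_num
        rw [skipRest]
        simp [skipSeg, (ih acc).1]
      · simp only [List.foldl_cons, removeNsStep]
        rw [if_pos ⟨h2, by simp⟩]
        have : skipRest (c :: rest) = skipRest rest := by
          rw [skipRest, skipRest, skipSeg, if_neg h2]
        rw [this]
        exact (ih acc).2

-- ===== VERDICT (by name: the statement is the Claim_ definition above) =====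
theorem remove_ns_spec : Claim_equal_remove_ns := by
  intro source _
  unfold Spec_remove_ns remove_ns remove_ns_alt
  rw [(fold_both source.toList []).1]
  simp
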